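-- pv_equiv track=rewrite | github.com/TimCixo/Gallery | run-app.py | colorize_art_lines
-- ===== SOURCE A (Python) =====
-- ANSI_RESET = "\033[0m"
--
-- COLOR_OUTPUT_ENABLED = True
--
-- def colorize_text(text: str, color: str | None) -> str:
--     if not COLOR_OUTPUT_ENABLED or color is None or not text:
--         return text
--     return f"{color}{text}{ANSI_RESET}"
--
-- def build_primary_art_component_mask(art_lines: list[str]) -> set[tuple[int, int]]:
--     points = {
--         (row_index, column_index)
--         for row_index, line in enumerate(art_lines)
--         for column_index, character in enumerate(line)
--         if character != " "
--     }
--     if not points: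
--         return set()
--
--     components: list[set[tuple[int, int]]] = []
--     visited: set[tuple[int, int]] = set()
--     neighbors = [
--         (-1, -1), (-1, 0), (-1, 1),
--         (0, -1),           (0, 1),
--         (1, -1),  (1, 0),  (1, 1),
--     ]
--
--     for point in points:
--         if point in visited:
--             continue
--
--         component: set[tuple[int, int]] = set()
--         stack = [point]
--         visited.add(point)
--         while stack:
--             row_index, column_index = stack.pop()
--             component.add((row_index, column_index))
--             for row_offset, column_offset in neighbors:
--                 neighbor = (row_index + row_offset, column_index + column_offset)
--                 if neighbor in points and neighbor not in visited:
--                     visited.add(neighbor)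
--                     stack.append(neighbor)
--         components.append(component)
--
--     components.sort(key=len, reverse=True)
--     return components[0]
--
-- def colorize_art_lines(art_lines: list[str], primary_color: str, secondary_color: str) -> list[str]:
--     if not COLOR_OUTPUT_ENABLED:
--         return art_lines
--
--     primary_component = build_primary_art_component_mask(art_lines)
--     colored_lines: list[str] = []
--     for row_index, line in enumerate(art_lines):
--         parts: list[str] = []
--         for column_index, character in enumerate(line):
--             if character == " ":
--                 parts.append(character)
--                 continue
--
--             color = primary_color if (row_index, column_index) in primary_component else secondary_color
--             parts.append(colorize_text(character, color))
--         colored_lines.append("".join(parts))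
--     return colored_lines
-- ===== SOURCE B (Python) =====
-- ANSI_RESET = "\033[0m"
--
--
-- def colorize_art_lines(art_lines: list[str], primary_color: str, secondary_color: str) -> list[str]:
--     # Level-set (frontier-expansion) component search with a running first-maximum,
--     # instead of per-node stack flood fill followed by a sort.
--     points = [(r, c)
--               for r, line in enumerate(art_lines)
--               for c, ch in enumerate(line)
--               if ch != " "]
--     point_set = set(points)
--
--     done = set()
--     best = set()
--     best_size = 0
--     for seed in points:
--         if seed in done:
--             continue
--         comp = {seed}
--         frontier = {seed}
--         while frontier:
--             frontier = ({(r + dr, c + dc)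
--                          for r, c in frontier
--                          for dr in (-1, 0, 1)
--                          for dc in (-1, 0, 1)
--                          if (dr, dc) != (0, 0)} & point_set) - comp
--             comp |= frontier
--         done |= comp
--         if len(comp) > best_size:
--             best = comp
--             best_size = len(comp)
--
--     return ["".join(ch if ch == " "
--                     else f"{primary_color if (r, c) in best else secondary_color}{ch}{ANSI_RESET}"
--                     for c, ch in enumerate(line))
--             for r, line in enumerate(art_lines)]
-- ===== Notes on version B (the rewrite author's own statement) =====
-- stated objective: alternative
-- what changed: Replaces the per-node stack flood fill plus a full descending sort of all components with a level-set frontier-expansion component search (set algebra, no per-node stack) and a single-pass running first-maximum, and builds each output line with one join-comprehension instead of an append loop.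
-- outside the precondition, e.g. on colorize_art_lines(['b   a'], 'P', 'S'): A returns ['Sb\x1b[0m   Pa\x1b[0m'], B returns ['Pb\x1b[0m   Sa\x1b[0m']; on colorize_art_lines(['a a'], 'P', 'S'): A returns ['Sa\x1b[0m Pa\x1b[0m'], B returns ['Pa\x1b[0m Sa\x1b[0m']
import Mathlib
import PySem

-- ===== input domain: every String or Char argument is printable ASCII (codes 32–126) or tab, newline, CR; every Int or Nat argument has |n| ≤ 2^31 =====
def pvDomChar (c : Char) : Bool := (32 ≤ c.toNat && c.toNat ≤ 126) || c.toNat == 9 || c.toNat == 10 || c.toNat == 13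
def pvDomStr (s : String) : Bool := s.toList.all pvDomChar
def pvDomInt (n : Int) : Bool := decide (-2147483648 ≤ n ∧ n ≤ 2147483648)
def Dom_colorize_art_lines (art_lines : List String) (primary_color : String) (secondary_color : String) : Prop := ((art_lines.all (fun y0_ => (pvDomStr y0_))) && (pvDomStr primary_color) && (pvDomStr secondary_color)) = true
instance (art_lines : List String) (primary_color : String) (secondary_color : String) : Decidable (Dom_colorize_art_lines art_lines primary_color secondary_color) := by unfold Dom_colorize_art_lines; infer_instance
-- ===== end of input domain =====

-- B replaces A's per-node stack flood fill + descending sort of all components by a level-set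
-- frontier-expansion component search with a running first maximum (objective: alternative).

-- ===== PORT A =====
def ANSI_RESET : String := "\x1b[0m"

def COLOR_OUTPUT_ENABLED : Bool := true

def colorize_text (text : String) (color : Option String) : String :=
  if COLOR_OUTPUT_ENABLED = false ∨ color = none ∨ text = "" then text
  else (color.getD "") ++ text ++ ANSI_RESET

-- the '(row_index, column_index) for … if character != " "' comprehension, row-major
-- (shared verbatim by A's set comprehension and B's list comprehension)
def pointsRowMajor (art_lines : List String) : List (Int × Int) :=
  (PySem.List.enumerate art_lines).flatMap (fun rl =>
    (PySem.List.enumerate rl.2.toList).filterMap (fun cc =>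
      if cc.2 ≠ ' ' then some (rl.1, cc.1) else none))

-- number of points not yet visited (termination measure for both worklist loops)
def pvUnvis (points visited : List (Int × Int)) : Nat :=
  (points.filter (fun q => !decide (q ∈ visited))).length

theorem pvUnvis_le_of_subset (points v w : List (Int × Int)) (h : ∀ x ∈ v, x ∈ w) :
    pvUnvis points w ≤ pvUnvis points v := by
  unfold pvUnvis
  induction points with
  | nil => simp
  | cons a l ih =>
    by_cases hw : a ∈ w
    · by_cases hv : a ∈ v <;> simp only [List.filter_cons, hw, hv, decide_true, decide_false,
        Bool.not_true, Bool.not_false, if_true, if_false, Bool.false_eq_true, List.length_cons] <;> omega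
    · have hv : a ∉ v := fun hx => hw (h a hx)
      simp only [List.filter_cons, hw, hv, decide_false, Bool.not_false, if_true, List.length_cons]
      omega

theorem pvUnvis_lt_of_new (points v w : List (Int × Int)) (x : Int × Int)
    (hsub : ∀ y ∈ v, y ∈ w) (hxp : x ∈ points) (hxv : x ∉ v) (hxw : x ∈ w) :
    pvUnvis points w < pvUnvis points v := by
  unfold pvUnvis
  induction points with
  | nil => simp at hxp
  | cons a l ih =>
    rcases List.mem_cons.mp hxp with rfl | hxl
    · simp only [List.filter_cons, hxw, hxv, decide_true, decide_false, Bool.not_true,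
        Bool.not_false, if_true, if_false, Bool.false_eq_true, List.length_cons]
      have := pvUnvis_le_of_subset l v w hsub
      unfold pvUnvis at this
      omega
    · have hrec := ih hxl
      by_cases hw : a ∈ w
      · by_cases hv : a ∈ v <;> simp only [List.filter_cons, hw, hv, decide_true, decide_false,
          Bool.not_true, Bool.not_false, if_true, if_false, Bool.false_eq_true, List.length_cons] <;> omega
      · have hv : a ∉ v := fun hy => hw (hsub a hy)
        simp only [List.filter_cons, hw, hv, decide_false, Bool.not_false, if_true, List.length_cons]
        omega

def neighborOffsets : List (Int × Int) :=
  [(-1,-1),(-1,0),(-1,1),(0,-1),(0,1),(1,-1),(1,0),(1,1)]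

-- the 'for row_offset, column_offset in neighbors: …' body of A's flood fill
def expandA (points : PySem.Set (Int × Int)) (p : Int × Int)
    (acc : PySem.Set (Int × Int) × List (Int × Int)) : PySem.Set (Int × Int) × List (Int × Int) :=
  neighborOffsets.foldl (fun vs off =>
    let nb : Int × Int := (p.1 + off.1, p.2 + off.2)
    if nb ∈ points ∧ nb ∉ vs.1 then (PySem.Set.add vs.1 nb, nb :: vs.2) else vs) acc

theorem expandA_measure_aux (points : PySem.Set (Int × Int)) (p : Int × Int) :
    ∀ (offs : List (Int × Int)) (acc : PySem.Set (Int × Int) × List (Int × Int)),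
    (offs.foldl (fun vs off =>
      let nb : Int × Int := (p.1 + off.1, p.2 + off.2)
      if nb ∈ points ∧ nb ∉ vs.1 then (PySem.Set.add vs.1 nb, nb :: vs.2) else vs) acc) = acc ∨
    pvUnvis points (offs.foldl (fun vs off =>
      let nb : Int × Int := (p.1 + off.1, p.2 + off.2)
      if nb ∈ points ∧ nb ∉ vs.1 then (PySem.Set.add vs.1 nb, nb :: vs.2) else vs) acc).1
      < pvUnvis points acc.1 := by
  intro offs
  induction offs with
  | nil => intro acc; left; rfl
  | cons o rest ih =>
    intro acc
    simp only [List.foldl_cons]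
    by_cases h : ((p.1 + o.1, p.2 + o.2) ∈ points ∧ (p.1 + o.1, p.2 + o.2) ∉ acc.1)
    · right
      simp only [if_pos h]
      set acc' := (PySem.Set.add acc.1 (p.1 + o.1, p.2 + o.2), (p.1 + o.1, p.2 + o.2) :: acc.2) with hacc'
      have hsub : ∀ x ∈ acc.1, x ∈ acc'.1 := by
        intro x hx
        exact (PySem.Set.mem_add acc.1 (p.1 + o.1, p.2 + o.2) x).mpr (Or.inl hx)
      have hlt : pvUnvis points acc'.1 < pvUnvis points acc.1 := by
        apply pvUnvis_lt_of_new points acc.1 acc'.1 (p.1 + o.1, p.2 + o.2) hsub h.1 h.2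
        exact (PySem.Set.mem_add acc.1 (p.1 + o.1, p.2 + o.2) _).mpr (Or.inr rfl)
      rcases ih acc' with heq | hlt2
      · rw [heq]; exact hlt
      · exact lt_trans hlt2 hlt
    · simpa [if_neg h] using ih acc

theorem expandA_measure (points : PySem.Set (Int × Int)) (p : Int × Int)
    (acc : PySem.Set (Int × Int) × List (Int × Int)) :
    expandA points p acc = acc ∨ pvUnvis points (expandA points p acc).1 < pvUnvis points acc.1 :=
  expandA_measure_aux points p neighborOffsets acc

-- A's 'while stack:' loop
def floodLoop (points : PySem.Set (Int × Int)) (visited : PySem.Set (Int × Int))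
    (stack : List (Int × Int)) (component : PySem.Set (Int × Int)) :
    PySem.Set (Int × Int) × PySem.Set (Int × Int) :=
  match stack with
  | [] => (component, visited)
  | p :: rest =>
      let component' := PySem.Set.add component p
      let vs := expandA points p (visited, rest)
      floodLoop points vs.1 vs.2 component'
termination_by (pvUnvis points visited, stack.length)
decreasing_by
  rcases expandA_measure points p (visited, rest) with heq | hlt
  · simp only [heq]
    exact Prod.Lex.right _ (by simp)
  · exact Prod.Lex.left _ _ hlt

-- A's build_primary_art_component_mask
def build_primary_art_component_mask (art_lines : List String) : PySem.Set (Int × Int) :=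
  let points : PySem.Set (Int × Int) := PySem.Set.ofList (pointsRowMajor art_lines)
  if points = [] then PySem.Set.empty
  else
    -- 'for point in points:' iterates Python's set; under Pre_ (unique largest component)
    -- the returned mask does not depend on that iteration order
    let cv := points.foldl (fun (cv : List (PySem.Set (Int × Int)) × PySem.Set (Int × Int)) point =>
        if point ∈ cv.2 then cv
        else
          let visited' := PySem.Set.add cv.2 point
          let res := floodLoop points visited' [point] PySem.Set.empty
          (cv.1 ++ [res.1], res.2)) ([], PySem.Set.empty)
    let sortedComponents := PySem.List.sorted cv.1 (fun c => PySem.List.len c) true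
    -- components[0]; components is provably nonempty here (points ≠ []), default unreachable
    PySem.List.pyGetD sortedComponents 0 PySem.Set.empty

def colorize_art_lines (art_lines : List String) (primary_color : String) (secondary_color : String) : List String :=
  if COLOR_OUTPUT_ENABLED = false then art_lines
  else
    let primary_component := build_primary_art_component_mask art_lines
    (PySem.List.enumerate art_lines).foldl (fun colored_lines rl =>
      let parts : List String := (PySem.List.enumerate rl.2.toList).foldl (fun parts cc =>
        if cc.2 = ' ' then parts ++ [String.ofList [cc.2]]
        else
          let color := if (rl.1, cc.1) ∈ primary_component then primary_color else secondary_color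
          parts ++ [colorize_text (String.ofList [cc.2]) (some color)]) []
      colored_lines ++ [PySem.Str.join "" parts]) []

-- ===== PORT B =====
-- the frontier-expansion set comprehension of Source B
def expandB (frontier : List (Int × Int)) : List (Int × Int) :=
  frontier.flatMap (fun rc =>
    ([-1, 0, 1] : List Int).flatMap (fun dr =>
      ([-1, 0, 1] : List Int).filterMap (fun dc =>
        if (dr, dc) ≠ ((0 : Int), (0 : Int)) then some (rc.1 + dr, rc.2 + dc) else none)))

-- Source B's 'while frontier:' loop
def bfsLoop (point_set : PySem.Set (Int × Int)) (comp : PySem.Set (Int × Int))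
    (frontier : PySem.Set (Int × Int)) : PySem.Set (Int × Int) :=
  match frontier with
  | [] => comp
  | f :: fr =>
      let frontier' := PySem.Set.diff (PySem.Set.inter (PySem.Set.ofList (expandB (f :: fr))) point_set) comp
      let comp' := PySem.Set.union comp frontier'
      bfsLoop point_set comp' frontier'
termination_by (pvUnvis point_set comp, frontier.length)
decreasing_by
  have Hmem : ∀ z ∈ PySem.Set.diff (PySem.Set.inter (PySem.Set.ofList (expandB (f :: fr))) point_set) comp,
      z ∈ point_set ∧ z ∉ comp := by
    intro z hz
    have hzd := (PySem.Set.mem_diff (PySem.Set.inter (PySem.Set.ofList (expandB (f :: fr))) point_set) comp z).mp hz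
    exact ⟨((PySem.Set.mem_inter (PySem.Set.ofList (expandB (f :: fr))) point_set z).mp hzd.1).2, hzd.2⟩
  have Hu : ∀ t : List (Int × Int), ∀ x ∈ comp, x ∈ PySem.Set.union comp t := by
    intro t x hx
    exact (PySem.Set.mem_union comp t x).mpr (Or.inl hx)
  rcases hfr : PySem.Set.diff (PySem.Set.inter (PySem.Set.ofList (expandB (f :: fr))) point_set) comp with _ | ⟨y, ys⟩
  · exact Prod.Lex.right _ (by simp)
  · apply Prod.Lex.left
    have hy : y ∈ PySem.Set.diff (PySem.Set.inter (PySem.Set.ofList (expandB (f :: fr))) point_set) comp := by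
      rw [hfr]; exact List.mem_cons_self
    exact pvUnvis_lt_of_new point_set comp (PySem.Set.union comp (y :: ys)) y (Hu (y :: ys))
      (Hmem y hy).1 (Hmem y hy).2 ((PySem.Set.mem_union comp (y :: ys) y).mpr (Or.inr List.mem_cons_self))

def colorize_art_lines_alt (art_lines : List String) (primary_color : String) (secondary_color : String) : List String :=
  let points := pointsRowMajor art_lines
  let point_set : PySem.Set (Int × Int) := PySem.Set.ofList points
  let st := points.foldl (fun (st : PySem.Set (Int × Int) × PySem.Set (Int × Int) × Int) seed =>
      if seed ∈ st.1 then st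
      else
        let comp := bfsLoop point_set (PySem.Set.ofList [seed]) (PySem.Set.ofList [seed])
        let done' := PySem.Set.union st.1 comp
        if PySem.List.len comp > st.2.2 then (done', comp, PySem.List.len comp)
        else (done', st.2.1, st.2.2))
    (PySem.Set.empty, PySem.Set.empty, 0)
  let best := st.2.1
  (PySem.List.enumerate art_lines).map (fun rl =>
    PySem.Str.join "" ((PySem.List.enumerate rl.2.toList).map (fun cc =>
      if cc.2 = ' ' then String.ofList [cc.2]
      else (if (rl.1, cc.1) ∈ best then primary_color else secondary_color) ++ String.ofList [cc.2] ++ ANSI_RESET)))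

-- ===== PRECONDITION & SPEC =====
-- 8-neighbourhood adjacency of two grid cells
def pvAdjB (a b : Int × Int) : Bool :=
  decide (a ≠ b) && decide ((a.1 - b.1).natAbs ≤ 1) && decide ((a.2 - b.2).natAbs ≤ 1)

-- one expansion step of the connected-component closure (mathematical transitive closure, bounded)
def pvGrow (pts : List (Int × Int)) (S : PySem.Set (Int × Int)) : PySem.Set (Int × Int) :=
  PySem.Set.update S (pts.filter (fun q => S.any (fun a => pvAdjB a q)))

-- the 8-connected component of p inside pts (|pts| expansion steps reach the closure)
def pvClosure (pts : List (Int × Int)) (p : Int × Int) : PySem.Set (Int × Int) :=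
  (pvGrow pts)^[pts.length] (PySem.Set.ofList [p])

-- Pre_ excludes art whose non-space cells have two or more equal-size largest 8-connected
-- components: there A's colored component is an accident of Python's set-iteration order
-- (neither A's nor B's choice is specified), and B naturally keeps the first component in
-- row-major order instead.
def Pre_colorize_art_lines (art_lines : List String) (primary_color : String) (secondary_color : String) : Prop :=
  pointsRowMajor art_lines = [] ∨
  ∃ p ∈ pointsRowMajor art_lines, ∀ q ∈ pointsRowMajor art_lines,
    q ∉ pvClosure (pointsRowMajor art_lines) p →
    (pvClosure (pointsRowMajor art_lines) q).length < (pvClosure (pointsRowMajor art_lines) p).length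

instance (art_lines : List String) (primary_color : String) (secondary_color : String) : Decidable (Pre_colorize_art_lines art_lines primary_color secondary_color) := by
  unfold Pre_colorize_art_lines; infer_instance

def pvWitness_colorize_art_lines : List String × String × String := (["ab", " b"], "P", "S")

def Spec_colorize_art_lines (art_lines : List String) (primary_color : String) (secondary_color : String) (out : List String) : Prop := out = colorize_art_lines_alt art_lines primary_color secondary_color
instance (art_lines : List String) (primary_color : String) (secondary_color : String) (out : List String) : Decidable (Spec_colorize_art_lines art_lines primary_color secondary_color out) := by unfold Spec_colorize_art_lines; infer_instance

-- ===== CLAIM (what is proved, stated in full; the proofs are below) =====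
def Claim_equal_colorize_art_lines : Prop := ∀ (art_lines : List String) (primary_color : String) (secondary_color : String), Dom_colorize_art_lines art_lines primary_color secondary_color → Pre_colorize_art_lines art_lines primary_color secondary_color → Spec_colorize_art_lines art_lines primary_color secondary_color (colorize_art_lines art_lines primary_color secondary_color)

-- ===== LEMMAS AND PROOFS =====

-- one adjacency step inside the point set, and reachability (the mathematical spec both
-- worklist loops are proved against)
def pvStep (pts : List (Int × Int)) (a b : Int × Int) : Prop := b ∈ pts ∧ pvAdjB a b = true

def pvReach (pts : List (Int × Int)) (p q : Int × Int) : Prop :=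
  Relation.ReflTransGen (pvStep pts) p q

theorem pvAdjB_iff (a b : Int × Int) :
    pvAdjB a b = true ↔ a ≠ b ∧ (a.1 - b.1).natAbs ≤ 1 ∧ (a.2 - b.2).natAbs ≤ 1 := by
  simp [pvAdjB, and_assoc]

theorem pvAdjB_symm (a b : Int × Int) : pvAdjB a b = pvAdjB b a := by
  rw [Bool.eq_iff_iff, pvAdjB_iff, pvAdjB_iff]
  constructor <;> rintro ⟨h1, h2, h3⟩ <;> exact ⟨Ne.symm h1, by omega, by omega⟩

theorem adjA_offsets (p q : Int × Int) :
    (∃ off ∈ neighborOffsets, q = (p.1 + off.1, p.2 + off.2)) ↔ pvAdjB p q = true := by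
  rw [pvAdjB_iff]
  constructor
  · rintro ⟨off, hoff, heq⟩
    have e1 : q.1 = p.1 + off.1 := congrArg Prod.fst heq
    have e2 : q.2 = p.2 + off.2 := congrArg Prod.snd heq
    clear heq
    have hn : ¬(p.1 = q.1 ∧ p.2 = q.2) := by
      rintro ⟨c1, c2⟩
      fin_cases hoff <;> simp_all <;> omega
    refine ⟨fun hc => hn ⟨congrArg Prod.fst hc, congrArg Prod.snd hc⟩, ?_, ?_⟩ <;>
      fin_cases hoff <;> simp_all <;> omega
  · rintro ⟨hne, h1, h2⟩
    have hne' : ¬(q.1 = p.1 ∧ q.2 = p.2) := by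
      rintro ⟨c1, c2⟩
      exact hne (Prod.ext c1.symm c2.symm)
    refine ⟨(q.1 - p.1, q.2 - p.2), ?_, by ext <;> simp <;> omega⟩
    have d1 : q.1 - p.1 = -1 ∨ q.1 - p.1 = 0 ∨ q.1 - p.1 = 1 := by omega
    have d2 : q.2 - p.2 = -1 ∨ q.2 - p.2 = 0 ∨ q.2 - p.2 = 1 := by omega
    have dne : ¬(q.1 - p.1 = 0 ∧ q.2 - p.2 = 0) := by rintro ⟨c1, c2⟩; exact hne' ⟨by omega, by omega⟩
    simp only [neighborOffsets, List.mem_cons, List.not_mem_nil, or_false, Prod.mk.injEq]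
    rcases d1 with h | h | h <;> rcases d2 with h' | h' | h' <;> simp_all

theorem mem_expandB (l : List (Int × Int)) (z : Int × Int) :
    z ∈ expandB l ↔ ∃ f ∈ l, pvAdjB f z = true := by
  unfold expandB
  rw [List.mem_flatMap]
  constructor
  · rintro ⟨f, hf, hz⟩
    refine ⟨f, hf, ?_⟩
    rw [List.mem_flatMap] at hz
    obtain ⟨dr, hdr, hz⟩ := hz
    rw [List.mem_filterMap] at hz
    obtain ⟨dc, hdc, hz⟩ := hz
    rw [pvAdjB_iff]
    by_cases h : ((dr, dc) ≠ ((0 : Int), (0 : Int)))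
    · rw [if_pos h] at hz
      have hz' : z = (f.1 + dr, f.2 + dc) := by injection hz with h'; exact h'.symm
      have e1 : z.1 = f.1 + dr := congrArg Prod.fst hz'
      have e2 : z.2 = f.2 + dc := congrArg Prod.snd hz'
      clear hz' hz
      have hn : ¬(dr = 0 ∧ dc = 0) := by
        rintro ⟨rfl, rfl⟩; exact h rfl
      have hnfz : ¬(f.1 = z.1 ∧ f.2 = z.2) := by
        rintro ⟨c1, c2⟩
        fin_cases hdr <;> fin_cases hdc <;> simp_all <;> omega
      refine ⟨fun hc => hnfz ⟨congrArg Prod.fst hc, congrArg Prod.snd hc⟩, ?_, ?_⟩ <;>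
        fin_cases hdr <;> fin_cases hdc <;> simp_all <;> omega
    · rw [if_neg h] at hz; cases hz
  · rintro ⟨f, hf, hadj⟩
    rw [pvAdjB_iff] at hadj
    obtain ⟨hne, h1, h2⟩ := hadj
    have hne' : ¬(f.1 = z.1 ∧ f.2 = z.2) := by
      rintro ⟨c1, c2⟩; exact hne (Prod.ext c1 c2)
    refine ⟨f, hf, ?_⟩
    rw [List.mem_flatMap]
    refine ⟨z.1 - f.1, by simp; omega, ?_⟩
    rw [List.mem_filterMap]
    refine ⟨z.2 - f.2, by simp; omega, ?_⟩
    rw [if_pos ?_]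
    · ext <;> simp <;> omega
    · rintro hc
      have c1 : z.1 - f.1 = 0 := congrArg Prod.fst hc
      have c2 : z.2 - f.2 = 0 := congrArg Prod.snd hc
      exact hne' ⟨by omega, by omega⟩

-- ---- reachability basics ----
theorem pvReach_refl (pts : List (Int × Int)) (p : Int × Int) : pvReach pts p p :=
  Relation.ReflTransGen.refl

theorem pvReach_mem (pts : List (Int × Int)) (p q : Int × Int) (h : pvReach pts p q) :
    q = p ∨ q ∈ pts := by
  induction h with
  | refl => exact Or.inl rfl
  | tail _ hstep _ => exact Or.inr hstep.1

theorem pvReach_mem' (pts : List (Int × Int)) (p q : Int × Int) (hp : p ∈ pts)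
    (h : pvReach pts p q) : q ∈ pts := by
  rcases pvReach_mem pts p q h with rfl | hq
  · exact hp
  · exact hq

theorem pvReach_tail (pts : List (Int × Int)) (p q r : Int × Int) (h : pvReach pts p q)
    (hr : r ∈ pts) (hadj : pvAdjB q r = true) : pvReach pts p r :=
  Relation.ReflTransGen.tail h ⟨hr, hadj⟩

theorem pvReach_symm (pts : List (Int × Int)) (p q : Int × Int) (hp : p ∈ pts)
    (h : pvReach pts p q) : pvReach pts q p := by
  induction h with
  | refl => exact Relation.ReflTransGen.refl
  | @tail b c _ hstep ih =>
    refine Relation.ReflTransGen.trans (Relation.ReflTransGen.single ?_) ih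
    refine ⟨?_, by rw [pvAdjB_symm]; exact hstep.2⟩
    rcases pvReach_mem pts p b (by assumption) with rfl | hb
    · exact hp
    · exact hb

theorem pvReach_congr (pts : List (Int × Int)) (p s : Int × Int) (hp : p ∈ pts)
    (hps : pvReach pts p s) : ∀ x, pvReach pts s x ↔ pvReach pts p x := by
  intro x
  constructor
  · intro hx; exact Relation.ReflTransGen.trans hps hx
  · intro hx; exact Relation.ReflTransGen.trans (pvReach_symm pts p s hp hps) hx

-- ---- closure ↔ reachability ----
theorem mem_pvGrow (pts : List (Int × Int)) (S : PySem.Set (Int × Int)) (x : Int × Int) :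
    x ∈ pvGrow pts S ↔ x ∈ S ∨ (x ∈ pts ∧ ∃ a ∈ S, pvAdjB a x = true) := by
  unfold pvGrow
  rw [PySem.Set.mem_update]
  simp [List.mem_filter, List.any_eq_true]

theorem pvGrow_subset (pts : List (Int × Int)) (S : PySem.Set (Int × Int)) :
    ∀ x ∈ S, x ∈ pvGrow pts S := fun x hx => (mem_pvGrow pts S x).mpr (Or.inl hx)

theorem pvGrow_nodup (pts : List (Int × Int)) (S : PySem.Set (Int × Int)) (h : S.Nodup) :
    (pvGrow pts S).Nodup := PySem.Set.nodup_update S _ h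

theorem pvClosure_nodup (pts : List (Int × Int)) (p : Int × Int) : (pvClosure pts p).Nodup := by
  unfold pvClosure
  induction pts.length with
  | zero => simpa using PySem.Set.nodup_ofList [p]
  | succ n ih =>
    rw [Function.iterate_succ_apply']
    exact pvGrow_nodup pts _ ih

theorem pvClosure_chain (pts : List (Int × Int)) (p : Int × Int) (k m : Nat) (h : k ≤ m) :
    ∀ x ∈ (pvGrow pts)^[k] (PySem.Set.ofList [p]), x ∈ (pvGrow pts)^[m] (PySem.Set.ofList [p]) := by
  induction m with
  | zero =>
    intro x hx
    rwa [Nat.le_zero.mp h] at hx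
  | succ n ih =>
    intro x hx
    rcases Nat.lt_succ_iff_lt_or_eq.mp (Nat.lt_succ_of_le h) with hlt | rfl
    · rw [Function.iterate_succ_apply']
      exact pvGrow_subset pts _ x (ih (Nat.lt_succ_iff.mp hlt) x hx)
    · exact hx

theorem pvClosure_iter_sub (pts : List (Int × Int)) (p : Int × Int) :
    ∀ (k : Nat), ∀ x ∈ (pvGrow pts)^[k] (PySem.Set.ofList [p]), pvReach pts p x := by
  intro k
  induction k with
  | zero =>
    intro x hx
    have : x = p := by
      rw [PySem.Set.ofList_eq_self_of_nodup [p] (List.nodup_singleton p)] at hx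
      simpa using hx
    rw [this]
    exact pvReach_refl pts p
  | succ n ih =>
    intro x hx
    rw [Function.iterate_succ_apply'] at hx
    rcases (mem_pvGrow pts _ x).mp hx with hx' | ⟨hxp, a, ha, hadj⟩
    · exact ih x hx'
    · exact pvReach_tail pts p a x (ih a ha) hxp hadj

theorem pvClosure_iter_nodup (pts : List (Int × Int)) (p : Int × Int) (k : Nat) :
    ((pvGrow pts)^[k] (PySem.Set.ofList [p])).Nodup := by
  induction k with
  | zero => exact PySem.Set.nodup_ofList [p]
  | succ n ih =>
    rw [Function.iterate_succ_apply']
    exact pvGrow_nodup pts _ ih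

theorem mem_pvClosure_self (pts : List (Int × Int)) (p : Int × Int) : p ∈ pvClosure pts p := by
  unfold pvClosure
  apply pvClosure_chain pts p 0 pts.length (Nat.zero_le _)
  rw [PySem.Set.ofList_eq_self_of_nodup [p] (List.nodup_singleton p)]
  exact List.mem_singleton.mpr rfl

theorem pvClosure_sub (pts : List (Int × Int)) (p q : Int × Int)
    (h : q ∈ pvClosure pts p) : pvReach pts p q :=
  pvClosure_iter_sub pts p pts.length q h

theorem pvGrow_len (pts : List (Int × Int)) (S : PySem.Set (Int × Int))
    (h : pvGrow pts S ≠ S) : S.length + 1 ≤ (pvGrow pts S).length := by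
  unfold pvGrow at *
  rw [PySem.Set.update_eq_append_filter] at *
  revert h
  rcases hext : (PySem.Set.ofList (pts.filter fun q => S.any fun a => pvAdjB a q)).filter
      (fun y => !PySem.Set.contains S y) with _ | ⟨e, es⟩ <;> intro h
  · simp at h
  · simp

theorem pvClosure_fixed (pts : List (Int × Int)) (p : Int × Int) (hp : p ∈ pts)
    (hnd : pts.Nodup) : pvGrow pts (pvClosure pts p) = pvClosure pts p := by
  have hsub : ∀ k, ∀ x ∈ (pvGrow pts)^[k] (PySem.Set.ofList [p]), x ∈ pts := by
    intro k x hx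
    exact pvReach_mem' pts p x hp (pvClosure_iter_sub pts p k x hx)
  have hbound : ∀ k, ((pvGrow pts)^[k] (PySem.Set.ofList [p])).length ≤ pts.length := by
    intro k
    have h1 := List.toFinset_card_of_nodup (pvClosure_iter_nodup pts p k)
    have h2 : ((pvGrow pts)^[k] (PySem.Set.ofList [p])).toFinset ⊆ pts.toFinset := by
      intro x hx
      rw [List.mem_toFinset] at *
      exact hsub k x hx
    have h3 := Finset.card_le_card h2
    have h4 := pts.toFinset_card_le
    omega
  have key : ∀ k : Nat, pvGrow pts ((pvGrow pts)^[k] (PySem.Set.ofList [p])) =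
      (pvGrow pts)^[k] (PySem.Set.ofList [p]) ∨
      k + 1 ≤ ((pvGrow pts)^[k] (PySem.Set.ofList [p])).length := by
    intro k
    induction k with
    | zero =>
      right
      rw [PySem.Set.ofList_eq_self_of_nodup [p] (List.nodup_singleton p)]
      simp
    | succ n ih =>
      rcases ih with hfix | hlen
      · left
        rw [Function.iterate_succ_apply', hfix, hfix]
      · by_cases hfix : pvGrow pts ((pvGrow pts)^[n] (PySem.Set.ofList [p])) =
            (pvGrow pts)^[n] (PySem.Set.ofList [p])
        · left
          rw [Function.iterate_succ_apply', hfix, hfix]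
        · right
          rw [Function.iterate_succ_apply']
          have := pvGrow_len pts _ hfix
          omega
  rcases key pts.length with hfix | hlen
  · exact hfix
  · have := hbound pts.length
    omega

theorem pvClosure_complete (pts : List (Int × Int)) (p q : Int × Int) (hp : p ∈ pts)
    (hnd : pts.Nodup) (h : pvReach pts p q) : q ∈ pvClosure pts p := by
  induction h with
  | refl => exact mem_pvClosure_self pts p
  | @tail b c _ hstep ih =>
    have := pvClosure_fixed pts p hp hnd
    rw [← this]
    exact (mem_pvGrow pts _ c).mpr (Or.inr ⟨hstep.1, b, ih, hstep.2⟩)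

theorem mem_pvClosure_iff (pts : List (Int × Int)) (p q : Int × Int) (hp : p ∈ pts)
    (hnd : pts.Nodup) : q ∈ pvClosure pts p ↔ pvReach pts p q :=
  ⟨pvClosure_sub pts p q, pvClosure_complete pts p q hp hnd⟩

-- a Nodup list whose members are exactly the component of s has the component's size
theorem pvClen_eq (pts : List (Int × Int)) (s : Int × Int) (C : List (Int × Int))
    (hp : s ∈ pts) (hnd : pts.Nodup) (hC : C.Nodup) (hmem : ∀ x, x ∈ C ↔ pvReach pts s x) :
    C.length = (pvClosure pts s).length := by
  have : C.Perm (pvClosure pts s) := by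
    rw [List.perm_ext_iff_of_nodup hC (pvClosure_nodup pts s)]
    intro x
    rw [hmem x, mem_pvClosure_iff pts s x hp hnd]
  exact this.length_eq

theorem pvClen_congr (pts : List (Int × Int)) (p s : Int × Int) (hp : p ∈ pts) (hs : s ∈ pts)
    (hnd : pts.Nodup) (hps : pvReach pts p s) :
    (pvClosure pts s).length = (pvClosure pts p).length := by
  apply pvClen_eq pts p (pvClosure pts s) hp hnd (pvClosure_nodup pts s)
  intro x
  rw [mem_pvClosure_iff pts s x hs hnd]
  exact pvReach_congr pts p s hp hps x

-- ---- what both algorithms compute: a largest-component mask ----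
def pvGoodMask (pts M : List (Int × Int)) : Prop :=
  (pts = [] → M = []) ∧
  (pts ≠ [] → ∃ s ∈ pts, (∀ x, x ∈ M ↔ pvReach pts s x) ∧
    ∀ t ∈ pts, (pvClosure pts t).length ≤ (pvClosure pts s).length)

theorem pvGoodMask_unique (pts M1 M2 : List (Int × Int)) (hnd : pts.Nodup)
    (hpre : pts = [] ∨ ∃ p ∈ pts, ∀ q ∈ pts, q ∉ pvClosure pts p →
      (pvClosure pts q).length < (pvClosure pts p).length)
    (h1 : pvGoodMask pts M1) (h2 : pvGoodMask pts M2) :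
    ∀ x, x ∈ M1 ↔ x ∈ M2 := by
  intro x
  rcases hpre with rfl | ⟨p, hp, hmax⟩
  · rw [h1.1 rfl, h2.1 rfl]
  · have hne : pts ≠ [] := List.ne_nil_of_mem hp
    obtain ⟨s1, hs1, hm1, hmax1⟩ := h1.2 hne
    obtain ⟨s2, hs2, hm2, hmax2⟩ := h2.2 hne
    have key : ∀ s ∈ pts, (∀ t ∈ pts, (pvClosure pts t).length ≤ (pvClosure pts s).length) →
        pvReach pts p s := by
      intro s hs hsmax
      by_contra hc
      have : s ∉ pvClosure pts p := fun hmem => hc (pvClosure_sub pts p s hmem)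
      have hlt := hmax s hs this
      have hge := hsmax p hp
      omega
    rw [hm1 x, hm2 x, pvReach_congr pts p s1 hp (key s1 hs1 hmax1) x,
      pvReach_congr pts p s2 hp (key s2 hs2 hmax2) x]

-- ---- A's inner neighbour scan: what one pop of the stack does ----
theorem expandA_fold_spec (pts : PySem.Set (Int × Int)) (p : Int × Int) :
    ∀ (offs : List (Int × Int)) (v : PySem.Set (Int × Int)) (st : List (Int × Int)),
    (∀ x ∈ v, x ∈ (offs.foldl (fun vs off =>
        let nb : Int × Int := (p.1 + off.1, p.2 + off.2)
        if nb ∈ pts ∧ nb ∉ vs.1 then (PySem.Set.add vs.1 nb, nb :: vs.2) else vs) (v, st)).1) ∧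
    (∀ x ∈ st, x ∈ (offs.foldl (fun vs off =>
        let nb : Int × Int := (p.1 + off.1, p.2 + off.2)
        if nb ∈ pts ∧ nb ∉ vs.1 then (PySem.Set.add vs.1 nb, nb :: vs.2) else vs) (v, st)).2) ∧
    (∀ x ∈ (offs.foldl (fun vs off =>
        let nb : Int × Int := (p.1 + off.1, p.2 + off.2)
        if nb ∈ pts ∧ nb ∉ vs.1 then (PySem.Set.add vs.1 nb, nb :: vs.2) else vs) (v, st)).1,
      x ∈ v ∨ (x ∈ pts ∧ (∃ off ∈ offs, x = (p.1 + off.1, p.2 + off.2)) ∧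
        x ∈ (offs.foldl (fun vs off =>
        let nb : Int × Int := (p.1 + off.1, p.2 + off.2)
        if nb ∈ pts ∧ nb ∉ vs.1 then (PySem.Set.add vs.1 nb, nb :: vs.2) else vs) (v, st)).2)) ∧
    (∀ x ∈ (offs.foldl (fun vs off =>
        let nb : Int × Int := (p.1 + off.1, p.2 + off.2)
        if nb ∈ pts ∧ nb ∉ vs.1 then (PySem.Set.add vs.1 nb, nb :: vs.2) else vs) (v, st)).2,
      x ∈ st ∨ (x ∈ pts ∧ (∃ off ∈ offs, x = (p.1 + off.1, p.2 + off.2)) ∧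
        x ∈ (offs.foldl (fun vs off =>
        let nb : Int × Int := (p.1 + off.1, p.2 + off.2)
        if nb ∈ pts ∧ nb ∉ vs.1 then (PySem.Set.add vs.1 nb, nb :: vs.2) else vs) (v, st)).1 ∧ x ∉ v)) ∧
    (∀ q ∈ pts, (∃ off ∈ offs, q = (p.1 + off.1, p.2 + off.2)) → q ∈ (offs.foldl (fun vs off =>
        let nb : Int × Int := (p.1 + off.1, p.2 + off.2)
        if nb ∈ pts ∧ nb ∉ vs.1 then (PySem.Set.add vs.1 nb, nb :: vs.2) else vs) (v, st)).1) := by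
  intro offs
  induction offs with
  | nil =>
    intro v st
    refine ⟨fun x hx => hx, fun x hx => hx, fun x hx => Or.inl hx, fun x hx => Or.inl hx, ?_⟩
    rintro q _ ⟨off, hoff, _⟩
    exact absurd hoff (List.not_mem_nil)
  | cons o rest ih =>
    intro v st
    simp only [List.foldl_cons]
    by_cases hc : ((p.1 + o.1, p.2 + o.2) ∈ pts ∧ (p.1 + o.1, p.2 + o.2) ∉ v)
    · simp only [if_pos hc]
      obtain ⟨ih1, ih2, ih3, ih4, ih5⟩ := ih (PySem.Set.add v (p.1 + o.1, p.2 + o.2)) ((p.1 + o.1, p.2 + o.2) :: st)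
      refine ⟨?_, ?_, ?_, ?_, ?_⟩
      · intro x hx
        exact ih1 x ((PySem.Set.mem_add v _ x).mpr (Or.inl hx))
      · intro x hx
        exact ih2 x (List.mem_cons_of_mem _ hx)
      · intro x hx
        rcases ih3 x hx with hxv | ⟨hxp, ⟨off, hoff, hxe⟩, hxs⟩
        · rcases (PySem.Set.mem_add v _ x).mp hxv with hxv' | rfl
          · exact Or.inl hxv'
          · exact Or.inr ⟨hc.1, ⟨o, List.mem_cons_self, rfl⟩, ih2 _ List.mem_cons_self⟩
        · exact Or.inr ⟨hxp, ⟨off, List.mem_cons_of_mem _ hoff, hxe⟩, hxs⟩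
      · intro x hx
        rcases ih4 x hx with hxs | ⟨hxp, ⟨off, hoff, hxe⟩, hxv, hxnv⟩
        · rcases List.mem_cons.mp hxs with rfl | hxs'
          · exact Or.inr ⟨hc.1, ⟨o, List.mem_cons_self, rfl⟩,
              ih1 _ ((PySem.Set.mem_add v _ _).mpr (Or.inr rfl)), hc.2⟩
          · exact Or.inl hxs'
        · refine Or.inr ⟨hxp, ⟨off, List.mem_cons_of_mem _ hoff, hxe⟩, hxv, ?_⟩
          intro hxv'
          exact hxnv ((PySem.Set.mem_add v _ x).mpr (Or.inl hxv'))
      · rintro q hq ⟨off, hoff, rfl⟩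
        rcases List.mem_cons.mp hoff with rfl | hoff'
        · exact ih1 _ ((PySem.Set.mem_add v _ _).mpr (Or.inr rfl))
        · exact ih5 _ hq ⟨off, hoff', rfl⟩
    · simp only [if_neg hc]
      obtain ⟨ih1, ih2, ih3, ih4, ih5⟩ := ih v st
      refine ⟨ih1, ih2, ?_, ?_, ?_⟩
      · intro x hx
        rcases ih3 x hx with hxv | ⟨hxp, ⟨off, hoff, hxe⟩, hxs⟩
        · exact Or.inl hxv
        · exact Or.inr ⟨hxp, ⟨off, List.mem_cons_of_mem _ hoff, hxe⟩, hxs⟩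
      · intro x hx
        rcases ih4 x hx with hxs | ⟨hxp, ⟨off, hoff, hxe⟩, hxv, hxnv⟩
        · exact Or.inl hxs
        · exact Or.inr ⟨hxp, ⟨off, List.mem_cons_of_mem _ hoff, hxe⟩, hxv, hxnv⟩
      · rintro q hq ⟨off, hoff, rfl⟩
        rcases List.mem_cons.mp hoff with rfl | hoff'
        · have hv : (p.1 + off.1, p.2 + off.2) ∈ v := by
            by_contra hnv
            exact hc ⟨hq, hnv⟩
          exact ih1 _ hv
        · exact ih5 _ hq ⟨off, hoff', rfl⟩

theorem expandA_spec (pts : PySem.Set (Int × Int)) (p : Int × Int)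
    (v : PySem.Set (Int × Int)) (st : List (Int × Int)) :
    (∀ x ∈ v, x ∈ (expandA pts p (v, st)).1) ∧
    (∀ x ∈ st, x ∈ (expandA pts p (v, st)).2) ∧
    (∀ x ∈ (expandA pts p (v, st)).1, x ∈ v ∨
      (x ∈ pts ∧ pvAdjB p x = true ∧ x ∈ (expandA pts p (v, st)).2)) ∧
    (∀ x ∈ (expandA pts p (v, st)).2, x ∈ st ∨
      (x ∈ pts ∧ pvAdjB p x = true ∧ x ∈ (expandA pts p (v, st)).1 ∧ x ∉ v)) ∧
    (∀ q ∈ pts, pvAdjB p q = true → q ∈ (expandA pts p (v, st)).1) := by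
  obtain ⟨h1, h2, h3, h4, h5⟩ := expandA_fold_spec pts p neighborOffsets v st
  refine ⟨h1, h2, ?_, ?_, ?_⟩
  · intro x hx
    rcases h3 x hx with hxv | ⟨hxp, hoff, hxs⟩
    · exact Or.inl hxv
    · exact Or.inr ⟨hxp, (adjA_offsets p x).mp hoff, hxs⟩
  · intro x hx
    rcases h4 x hx with hxs | ⟨hxp, hoff, hxv, hxnv⟩
    · exact Or.inl hxs
    · exact Or.inr ⟨hxp, (adjA_offsets p x).mp hoff, hxv, hxnv⟩
  · intro q hq hadj
    exact h5 q hq ((adjA_offsets p q).mpr hadj)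

-- ---- A's flood fill computes exactly the component of its seed ----
theorem floodLoop_spec (pts V0 : PySem.Set (Int × Int)) (seed : Int × Int)
    (hV0closed : ∀ a ∈ V0, ∀ q ∈ pts, pvAdjB a q = true → q ∈ V0) :
    ∀ (v : PySem.Set (Int × Int)) (stack : List (Int × Int)) (comp : PySem.Set (Int × Int)),
    (∀ x ∈ stack, x ∈ v) →
    (∀ x ∈ stack, x ∈ pts) →
    (∀ x ∈ stack, x ∉ V0) →
    (∀ x ∈ comp, x ∉ V0) →
    (∀ x ∈ comp, x ∈ pts) →
    comp.Nodup →
    (∀ x, x ∈ v ↔ (x ∈ V0 ∨ x ∈ comp ∨ x ∈ stack)) →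
    (∀ x, (x ∈ comp ∨ x ∈ stack) → pvReach pts seed x) →
    (seed ∈ comp ∨ seed ∈ stack) →
    (∀ a ∈ comp, ∀ q ∈ pts, pvAdjB a q = true → q ∈ v) →
    ((∀ x, x ∈ (floodLoop pts v stack comp).1 ↔ pvReach pts seed x) ∧
     (floodLoop pts v stack comp).1.Nodup ∧
     (∀ x, x ∈ (floodLoop pts v stack comp).2 ↔ (x ∈ V0 ∨ x ∈ (floodLoop pts v stack comp).1))) := by
  intro v stack comp
  induction v, stack, comp using floodLoop.induct pts with
  | case1 v comp =>
    intro h1 h2 h3 h4 h5 h6 h7 h8 h9 h10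
    rw [floodLoop]
    refine ⟨?_, h6, ?_⟩
    · intro x
      constructor
      · intro hx
        exact h8 x (Or.inl hx)
      · intro hx
        induction hx with
        | refl =>
          rcases h9 with hs | hs
          · exact hs
          · exact absurd hs (List.not_mem_nil)
        | @tail b c _ hstep ihh =>
          have hcv := h10 b ihh c hstep.1 hstep.2
          rcases (h7 c).mp hcv with hc0 | hcc | hcs
          · exfalso
            have hba : pvAdjB c b = true := by rw [pvAdjB_symm]; exact hstep.2
            exact h4 b ihh (hV0closed c hc0 b (h5 b ihh) hba)
          · exact hcc
          · exact absurd hcs (List.not_mem_nil)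
    · intro x
      rw [h7 x]
      simp
  | case2 v comp p rest comp2 vs2 ih =>
    intro h1 h2 h3 h4 h5 h6 h7 h8 h9 h10
    obtain ⟨e1, e2, e3, e4, e5⟩ := expandA_spec pts p v rest
    have hp_v : p ∈ v := h1 p List.mem_cons_self
    have hp_pts : p ∈ pts := h2 p List.mem_cons_self
    have hp_nV0 : p ∉ V0 := h3 p List.mem_cons_self
    have hp_reach : pvReach pts seed p := h8 p (Or.inr List.mem_cons_self)
    rw [floodLoop]
    apply ih
    · intro x hx
      rcases e4 x hx with hxr | ⟨_, _, hxv, _⟩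
      · exact e1 x (h1 x (List.mem_cons_of_mem _ hxr))
      · exact hxv
    · intro x hx
      rcases e4 x hx with hxr | ⟨hxp, _, _, _⟩
      · exact h2 x (List.mem_cons_of_mem _ hxr)
      · exact hxp
    · intro x hx
      rcases e4 x hx with hxr | ⟨_, _, _, hxnv⟩
      · exact h3 x (List.mem_cons_of_mem _ hxr)
      · intro hx0
        exact hxnv ((h7 x).mpr (Or.inl hx0))
    · intro x hx
      rcases (PySem.Set.mem_add comp p x).mp hx with hxc | rfl
      · exact h4 x hxc
      · exact hp_nV0
    · intro x hx
      rcases (PySem.Set.mem_add comp p x).mp hx with hxc | rfl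
      · exact h5 x hxc
      · exact hp_pts
    · exact PySem.Set.nodup_add comp p h6
    · intro x
      constructor
      · intro hx
        rcases e3 x hx with hxv | ⟨hxp, hadj, hxs⟩
        · rcases (h7 x).mp hxv with h0 | hc | hs
          · exact Or.inl h0
          · exact Or.inr (Or.inl ((PySem.Set.mem_add comp p x).mpr (Or.inl hc)))
          · rcases List.mem_cons.mp hs with heq | hs'
            · rw [heq]
              exact Or.inr (Or.inl ((PySem.Set.mem_add comp p p).mpr (Or.inr rfl)))
            · exact Or.inr (Or.inr (e2 x hs'))
        · exact Or.inr (Or.inr hxs)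
      · intro hx
        rcases hx with h0 | hc | hs
        · exact e1 x ((h7 x).mpr (Or.inl h0))
        · rcases (PySem.Set.mem_add comp p x).mp hc with hc' | rfl
          · exact e1 x ((h7 x).mpr (Or.inr (Or.inl hc')))
          · exact e1 x hp_v
        · rcases e4 x hs with hxr | ⟨_, _, hxv, _⟩
          · exact e1 x (h1 x (List.mem_cons_of_mem _ hxr))
          · exact hxv
    · intro x hx
      rcases hx with hc | hs
      · rcases (PySem.Set.mem_add comp p x).mp hc with hc' | rfl
        · exact h8 x (Or.inl hc')
        · exact hp_reach
      · rcases e4 x hs with hxr | ⟨hxp, hadj, _, _⟩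
        · exact h8 x (Or.inr (List.mem_cons_of_mem _ hxr))
        · exact pvReach_tail pts seed p x hp_reach hxp hadj
    · rcases h9 with hs | hs
      · exact Or.inl ((PySem.Set.mem_add comp p seed).mpr (Or.inl hs))
      · rcases List.mem_cons.mp hs with heq | hs'
        · rw [heq]
          exact Or.inl ((PySem.Set.mem_add comp p p).mpr (Or.inr rfl))
        · exact Or.inr (e2 seed hs')
    · intro a ha q hq hadj
      rcases (PySem.Set.mem_add comp p a).mp ha with ha' | rfl
      · exact e1 q (h10 a ha' q hq hadj)
      · exact e5 q hq hadj

-- ---- A's outer loop: invariant over the seed scan ----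
def pvInvA (pts : List (Int × Int)) (acc : List (PySem.Set (Int × Int)) × PySem.Set (Int × Int)) : Prop :=
  (∀ C ∈ acc.1, ∃ s ∈ pts, (∀ x, x ∈ C ↔ pvReach pts s x) ∧ C.Nodup) ∧
  (∀ x, x ∈ acc.2 ↔ ∃ C ∈ acc.1, x ∈ C) ∧
  (∀ a ∈ acc.2, ∀ q ∈ pts, pvAdjB a q = true → q ∈ acc.2)

theorem outerA_spec (pts : PySem.Set (Int × Int)) :
    ∀ (l : List (Int × Int)), (∀ x ∈ l, x ∈ pts) →
    ∀ (acc : List (PySem.Set (Int × Int)) × PySem.Set (Int × Int)), pvInvA pts acc →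
    pvInvA pts (l.foldl (fun cv point =>
        if point ∈ cv.2 then cv
        else
          let visited' := PySem.Set.add cv.2 point
          let res := floodLoop pts visited' [point] PySem.Set.empty
          (cv.1 ++ [res.1], res.2)) acc) ∧
    (∀ t ∈ l, t ∈ (l.foldl (fun cv point =>
        if point ∈ cv.2 then cv
        else
          let visited' := PySem.Set.add cv.2 point
          let res := floodLoop pts visited' [point] PySem.Set.empty
          (cv.1 ++ [res.1], res.2)) acc).2) ∧
    (∀ x ∈ acc.2, x ∈ (l.foldl (fun cv point =>
        if point ∈ cv.2 then cv
        else
          let visited' := PySem.Set.add cv.2 point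
          let res := floodLoop pts visited' [point] PySem.Set.empty
          (cv.1 ++ [res.1], res.2)) acc).2) := by
  intro l
  induction l with
  | nil =>
    intro _ acc hacc
    exact ⟨hacc, fun t ht => absurd ht (List.not_mem_nil), fun x hx => hx⟩
  | cons t rest ih =>
    intro hl acc hacc
    obtain ⟨i1, i2, i3⟩ := hacc
    have ht_pts : t ∈ pts := hl t List.mem_cons_self
    simp only [List.foldl_cons]
    by_cases hmem : t ∈ acc.2
    · rw [if_pos hmem]
      obtain ⟨j1, j2, j3⟩ := ih (fun x hx => hl x (List.mem_cons_of_mem _ hx)) acc ⟨i1, i2, i3⟩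
      refine ⟨j1, ?_, j3⟩
      intro x hx
      rcases List.mem_cons.mp hx with rfl | hx'
      · exact j3 x hmem
      · exact j2 x hx'
    · rw [if_neg hmem]
      have hfl := floodLoop_spec pts acc.2 t i3 (PySem.Set.add acc.2 t) [t] PySem.Set.empty
        (by intro x hx
            have hxt : x = t := List.mem_singleton.mp hx
            subst hxt
            exact (PySem.Set.mem_add acc.2 x x).mpr (Or.inr rfl))
        (by intro x hx
            have hxt : x = t := List.mem_singleton.mp hx
            subst hxt
            exact ht_pts)
        (by intro x hx
            have hxt : x = t := List.mem_singleton.mp hx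
            subst hxt
            exact hmem)
        (by intro x hx; exact absurd hx (List.not_mem_nil))
        (by intro x hx; exact absurd hx (List.not_mem_nil))
        (List.nodup_nil)
        (by intro x
            rw [PySem.Set.mem_add acc.2 t x]
            constructor
            · rintro (hx | rfl)
              · exact Or.inl hx
              · exact Or.inr (Or.inr List.mem_cons_self)
            · rintro (hx | hx | hx)
              · exact Or.inl hx
              · exact absurd hx (List.not_mem_nil)
              · exact Or.inr (List.mem_singleton.mp hx))
        (by rintro x (hx | hx)
            · exact absurd hx (List.not_mem_nil)
            · have hxt : x = t := List.mem_singleton.mp hx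
              subst hxt
              exact pvReach_refl pts x)
        (Or.inr List.mem_cons_self)
        (by intro a ha; exact absurd ha (List.not_mem_nil))
      obtain ⟨f1, f2, f3⟩ := hfl
      set res := floodLoop pts (PySem.Set.add acc.2 t) [t] PySem.Set.empty with hres
      have hinv' : pvInvA pts (acc.1 ++ [res.1], res.2) := by
        refine ⟨?_, ?_, ?_⟩
        · intro C hC
          rcases List.mem_append.mp hC with hC' | hC'
          · exact i1 C hC'
          · rw [List.mem_singleton.mp hC']
            exact ⟨t, ht_pts, f1, f2⟩
        · intro x
          rw [f3 x]
          constructor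
          · rintro (hx | hx)
            · obtain ⟨C, hC, hxC⟩ := (i2 x).mp hx
              exact ⟨C, List.mem_append.mpr (Or.inl hC), hxC⟩
            · exact ⟨res.1, List.mem_append.mpr (Or.inr List.mem_cons_self), hx⟩
          · rintro ⟨C, hC, hxC⟩
            rcases List.mem_append.mp hC with hC' | hC'
            · exact Or.inl ((i2 x).mpr ⟨C, hC', hxC⟩)
            · rw [List.mem_singleton.mp hC'] at hxC
              exact Or.inr hxC
        · intro a ha q hq hadj
          rcases (f3 a).mp ha with ha' | ha'
          · exact (f3 q).mpr (Or.inl (i3 a ha' q hq hadj))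
          · have : pvReach pts t q := pvReach_tail pts t a q ((f1 a).mp ha') hq hadj
            exact (f3 q).mpr (Or.inr ((f1 q).mpr this))
      obtain ⟨j1, j2, j3⟩ := ih (fun x hx => hl x (List.mem_cons_of_mem _ hx)) _ hinv'
      refine ⟨j1, ?_, ?_⟩
      · intro x hx
        rcases List.mem_cons.mp hx with rfl | hx'
        · exact j3 x ((f3 x).mpr (Or.inr ((f1 x).mpr (pvReach_refl pts x))))
        · exact j2 x hx'
      · intro x hx
        exact j3 x ((f3 x).mpr (Or.inl hx))

-- ---- the non-space cells are pairwise-distinct coordinates ----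
theorem pointsRowMajor_inner_fst (r : Int) (line : String) :
    ∀ x ∈ (PySem.List.enumerate line.toList).filterMap (fun cc =>
      if cc.2 ≠ ' ' then some (r, cc.1) else none), x.1 = r := by
  intro x hx
  rw [List.mem_filterMap] at hx
  obtain ⟨cc, _, hcc⟩ := hx
  by_cases h : cc.2 ≠ ' '
  · rw [if_pos h] at hcc
    cases hcc
    rfl
  · rw [if_neg h] at hcc
    cases hcc

theorem nodup_pointsRowMajor (art : List String) : (pointsRowMajor art).Nodup := by
  unfold pointsRowMajor
  rw [List.nodup_flatMap]
  constructor
  · intro rl _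
    show List.Pairwise _ _
    rw [List.pairwise_filterMap]
    apply List.Pairwise.imp ?_ (PySem.List.pairwise_lt_enumerate rl.2.toList 0)
    intro a a' hlt b hb b' hb'
    by_cases ha : a.2 ≠ ' '
    · rw [if_pos ha] at hb
      by_cases ha' : a'.2 ≠ ' '
      · rw [if_pos ha'] at hb'
        cases hb; cases hb'
        intro hc
        have := congrArg Prod.snd hc
        simp at this
        omega
      · rw [if_neg ha'] at hb'
        cases hb'
    · rw [if_neg ha] at hb
      cases hb
  · apply List.Pairwise.imp ?_ (PySem.List.pairwise_lt_enumerate art 0)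
    intro a b hlt
    intro x hxa hxb
    have h1 := pointsRowMajor_inner_fst a.1 a.2 x hxa
    have h2 := pointsRowMajor_inner_fst b.1 b.2 x hxb
    omega

-- ---- B's frontier loop computes exactly the component of its seed ----
theorem bfsLoop_spec (pts : PySem.Set (Int × Int)) (seed : Int × Int) :
    ∀ (comp frontier : PySem.Set (Int × Int)),
    (∀ x ∈ frontier, x ∈ comp) →
    comp.Nodup →
    (∀ x ∈ comp, pvReach pts seed x) →
    seed ∈ comp →
    (∀ a ∈ comp, a ∉ frontier → ∀ q ∈ pts, pvAdjB a q = true → q ∈ comp) →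
    ((∀ x, x ∈ bfsLoop pts comp frontier ↔ pvReach pts seed x) ∧
      (bfsLoop pts comp frontier).Nodup) := by
  intro comp frontier
  induction comp, frontier using bfsLoop.induct pts with
  | case1 comp =>
    intro _ h2 h3 h4 h5
    rw [bfsLoop]
    refine ⟨?_, h2⟩
    intro x
    constructor
    · intro hx
      exact h3 x hx
    · intro hx
      induction hx with
      | refl => exact h4
      | @tail b c _ hstep ihh =>
        exact h5 b ihh (List.not_mem_nil) c hstep.1 hstep.2
  | case2 comp f fr front2 comp2 ih =>
    intro h1 h2 h3 h4 h5
    have hfr' : ∀ x, x ∈ PySem.Set.diff (PySem.Set.inter (PySem.Set.ofList (expandB (f :: fr))) pts) comp ↔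
        ((∃ g ∈ (f :: fr), pvAdjB g x = true) ∧ x ∈ pts ∧ x ∉ comp) := by
      intro x
      rw [PySem.Set.mem_diff, PySem.Set.mem_inter, PySem.Set.mem_ofList, mem_expandB]
      tauto
    have hcu : ∀ x, x ∈ PySem.Set.union comp (PySem.Set.diff (PySem.Set.inter (PySem.Set.ofList (expandB (f :: fr))) pts) comp) ↔
        (x ∈ comp ∨ x ∈ PySem.Set.diff (PySem.Set.inter (PySem.Set.ofList (expandB (f :: fr))) pts) comp) :=
      PySem.Set.mem_union comp _
    rw [bfsLoop]
    apply ih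
    · intro x hx
      exact (hcu x).mpr (Or.inr hx)
    · exact PySem.Set.nodup_union comp _ h2
    · intro x hx
      rcases (hcu x).mp hx with hxc | hxf
      · exact h3 x hxc
      · obtain ⟨⟨g, hg, hadj⟩, hxp, _⟩ := (hfr' x).mp hxf
        exact pvReach_tail pts seed g x (h3 g (h1 g hg)) hxp hadj
    · exact (hcu seed).mpr (Or.inl h4)
    · intro a ha hanf q hq hadj
      rcases (hcu a).mp ha with hac | haf
      · by_cases haold : a ∈ (f :: fr)
        · by_cases hqc : q ∈ comp
          · exact (hcu q).mpr (Or.inl hqc)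
          · refine (hcu q).mpr (Or.inr ((hfr' q).mpr ⟨⟨a, haold, hadj⟩, hq, hqc⟩))
        · exact (hcu q).mpr (Or.inl (h5 a hac haold q hq hadj))
      · exact absurd haf hanf

-- ---- B's outer loop: invariant over the seed scan ----
def pvInvB (pts : List (Int × Int)) (acc : PySem.Set (Int × Int) × PySem.Set (Int × Int) × Int) : Prop :=
  (∀ x ∈ acc.1, x ∈ pts) ∧
  (∀ a ∈ acc.1, ∀ q ∈ pts, pvAdjB a q = true → q ∈ acc.1) ∧
  ((acc.1 = [] ∧ acc.2.1 = [] ∧ acc.2.2 = 0) ∨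
   (∃ s ∈ pts, (∀ x, x ∈ acc.2.1 ↔ pvReach pts s x) ∧ acc.2.1.Nodup ∧
     acc.2.2 = PySem.List.len acc.2.1 ∧
     (∀ t ∈ acc.1, (pvClosure pts t).length ≤ (pvClosure pts s).length)))

theorem outerB_spec (pts : PySem.Set (Int × Int)) (hnd : pts.Nodup) :
    ∀ (l : List (Int × Int)), (∀ x ∈ l, x ∈ pts) →
    ∀ acc, pvInvB pts acc →
    pvInvB pts (l.foldl (fun st seed =>
      if seed ∈ st.1 then st
      else
        let comp := bfsLoop pts (PySem.Set.ofList [seed]) (PySem.Set.ofList [seed])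
        let done' := PySem.Set.union st.1 comp
        if PySem.List.len comp > st.2.2 then (done', comp, PySem.List.len comp)
        else (done', st.2.1, st.2.2)) acc) ∧
    (∀ t ∈ l, t ∈ (l.foldl (fun st seed =>
      if seed ∈ st.1 then st
      else
        let comp := bfsLoop pts (PySem.Set.ofList [seed]) (PySem.Set.ofList [seed])
        let done' := PySem.Set.union st.1 comp
        if PySem.List.len comp > st.2.2 then (done', comp, PySem.List.len comp)
        else (done', st.2.1, st.2.2)) acc).1) ∧
    (∀ x ∈ acc.1, x ∈ (l.foldl (fun st seed =>
      if seed ∈ st.1 then st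
      else
        let comp := bfsLoop pts (PySem.Set.ofList [seed]) (PySem.Set.ofList [seed])
        let done' := PySem.Set.union st.1 comp
        if PySem.List.len comp > st.2.2 then (done', comp, PySem.List.len comp)
        else (done', st.2.1, st.2.2)) acc).1) := by
  intro l
  induction l with
  | nil =>
    intro _ acc hacc
    exact ⟨hacc, fun t ht => absurd ht (List.not_mem_nil), fun x hx => hx⟩
  | cons t rest ih =>
    intro hl acc hacc
    have ht_pts : t ∈ pts := hl t List.mem_cons_self
    simp only [List.foldl_cons]
    by_cases hmem : t ∈ acc.1
    · rw [if_pos hmem]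
      obtain ⟨j1, j2, j3⟩ := ih (fun x hx => hl x (List.mem_cons_of_mem _ hx)) acc hacc
      refine ⟨j1, ?_, j3⟩
      intro x hx
      rcases List.mem_cons.mp hx with heq | hx'
      · rw [heq]; exact j3 t hmem
      · exact j2 x hx'
    · rw [if_neg hmem]
      have hsingle : PySem.Set.ofList [t] = [t] :=
        PySem.Set.ofList_eq_self_of_nodup [t] (List.nodup_singleton t)
      have hbfs := bfsLoop_spec pts t (PySem.Set.ofList [t]) (PySem.Set.ofList [t])
        (fun x hx => hx)
        (by rw [hsingle]; exact List.nodup_singleton t)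
        (by rw [hsingle]
            intro x hx
            have hxt : x = t := List.mem_singleton.mp hx
            subst hxt
            exact pvReach_refl pts x)
        (by rw [hsingle]; exact List.mem_cons_self)
        (by intro a ha hna q hq hadj; exact absurd ha hna)
      obtain ⟨fC, fCnd⟩ := hbfs
      set C := bfsLoop pts (PySem.Set.ofList [t]) (PySem.Set.ofList [t]) with hC
      have htC : t ∈ C := (fC t).mpr (pvReach_refl pts t)
      have hCpts : ∀ x ∈ C, x ∈ pts := fun x hx => pvReach_mem' pts t x ht_pts ((fC x).mp hx)
      have hClen : C.length = (pvClosure pts t).length :=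
        pvClen_eq pts t C ht_pts hnd fCnd fC
      have hCpos : 0 < C.length := List.length_pos_of_mem htC
      obtain ⟨k1, k2, k3⟩ := hacc
      have hdone' : ∀ x, x ∈ PySem.Set.union acc.1 C ↔ (x ∈ acc.1 ∨ x ∈ C) :=
        PySem.Set.mem_union acc.1 C
      have hK1 : ∀ x ∈ PySem.Set.union acc.1 C, x ∈ pts := by
        intro x hx
        rcases (hdone' x).mp hx with h | h
        · exact k1 x h
        · exact hCpts x h
      have hK2 : ∀ a ∈ PySem.Set.union acc.1 C, ∀ q ∈ pts, pvAdjB a q = true →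
          q ∈ PySem.Set.union acc.1 C := by
        intro a ha q hq hadj
        rcases (hdone' a).mp ha with h | h
        · exact (hdone' q).mpr (Or.inl (k2 a h q hq hadj))
        · exact (hdone' q).mpr (Or.inr ((fC q).mpr
            (pvReach_tail pts t a q ((fC a).mp h) hq hadj)))
      by_cases hgt : PySem.List.len C > acc.2.2
      · rw [if_pos hgt]
        have hinv' : pvInvB pts (PySem.Set.union acc.1 C, C, PySem.List.len C) := by
          refine ⟨hK1, hK2, Or.inr ⟨t, ht_pts, fC, fCnd, rfl, ?_⟩⟩
          intro x hx
          rcases (hdone' x).mp hx with h | h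
          · rcases k3 with ⟨hd0, _, hs0⟩ | ⟨s0, hs0pts, hm0, hnd0, hsz0, hmax0⟩
            · rw [hd0] at h
              exact absurd h (List.not_mem_nil)
            · have h1 := hmax0 x h
              have h2 : acc.2.1.length = (pvClosure pts s0).length :=
                pvClen_eq pts s0 acc.2.1 hs0pts hnd hnd0 hm0
              rw [hsz0, PySem.List.len_eq, PySem.List.len_eq] at hgt
              have h3 : acc.2.1.length < C.length := by exact_mod_cast hgt
              omega
          · have : (pvClosure pts x).length = (pvClosure pts t).length :=
              pvClen_congr pts t x ht_pts (hCpts x h) hnd ((fC x).mp h)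
            omega
        obtain ⟨j1, j2, j3⟩ := ih (fun x hx => hl x (List.mem_cons_of_mem _ hx)) _ hinv'
        refine ⟨j1, ?_, ?_⟩
        · intro x hx
          rcases List.mem_cons.mp hx with heq | hx'
          · rw [heq]
            exact j3 t ((hdone' t).mpr (Or.inr htC))
          · exact j2 x hx'
        · intro x hx
          exact j3 x ((hdone' x).mpr (Or.inl hx))
      · rw [if_neg hgt]
        rcases k3 with ⟨hd0, hb0, hs0⟩ | ⟨s0, hs0pts, hm0, hnd0, hsz0, hmax0⟩
        · exfalso
          rw [hs0, PySem.List.len_eq] at hgt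
          have : ¬ ((0 : Int) < (C.length : Int)) := hgt
          have hcast : (0 : Int) < (C.length : Int) := by exact_mod_cast hCpos
          exact this hcast
        · have hszle : C.length ≤ acc.2.1.length := by
            rw [hsz0, PySem.List.len_eq, PySem.List.len_eq] at hgt
            have : ¬ ((acc.2.1.length : Int) < (C.length : Int)) := hgt
            omega
          have hinv' : pvInvB pts (PySem.Set.union acc.1 C, acc.2.1, acc.2.2) := by
            refine ⟨hK1, hK2, Or.inr ⟨s0, hs0pts, hm0, hnd0, hsz0, ?_⟩⟩
            intro x hx
            have h2 : acc.2.1.length = (pvClosure pts s0).length :=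
              pvClen_eq pts s0 acc.2.1 hs0pts hnd hnd0 hm0
            rcases (hdone' x).mp hx with h | h
            · exact hmax0 x h
            · have h3 : (pvClosure pts x).length = (pvClosure pts t).length :=
                pvClen_congr pts t x ht_pts (hCpts x h) hnd ((fC x).mp h)
              omega
          obtain ⟨j1, j2, j3⟩ := ih (fun x hx => hl x (List.mem_cons_of_mem _ hx)) _ hinv'
          refine ⟨j1, ?_, ?_⟩
          · intro x hx
            rcases List.mem_cons.mp hx with heq | hx'
            · rw [heq]
              exact j3 t ((hdone' t).mpr (Or.inr htC))
            · exact j2 x hx'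
          · intro x hx
            exact j3 x ((hdone' x).mpr (Or.inl hx))

-- ---- the two ports produce largest-component masks ----
theorem maskA_good (art : List String) :
    pvGoodMask (pointsRowMajor art) (build_primary_art_component_mask art) := by
  have hnd := nodup_pointsRowMajor art
  have hmaskeq : build_primary_art_component_mask art =
      (if pointsRowMajor art = [] then PySem.Set.empty
       else PySem.List.pyGetD (PySem.List.sorted ((pointsRowMajor art).foldl (fun cv point =>
          if point ∈ cv.2 then cv
          else
            let visited' := PySem.Set.add cv.2 point
            let res := floodLoop (pointsRowMajor art) visited' [point] PySem.Set.empty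
            (cv.1 ++ [res.1], res.2)) ([], PySem.Set.empty)).1
          (fun c => PySem.List.len c) true) 0 PySem.Set.empty) := by
    unfold build_primary_art_component_mask
    rw [PySem.Set.ofList_eq_self_of_nodup (pointsRowMajor art) hnd]
  rw [hmaskeq]
  by_cases hpts : pointsRowMajor art = []
  · rw [if_pos hpts]
    exact ⟨fun _ => rfl, fun hne => absurd hpts hne⟩
  · rw [if_neg hpts]
    have hinv0 : pvInvA (pointsRowMajor art) ([], PySem.Set.empty) := by
      refine ⟨?_, ?_, ?_⟩
      · intro C hC
        exact absurd hC (List.not_mem_nil)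
      · intro x
        constructor
        · intro hx
          exact absurd hx (List.not_mem_nil)
        · rintro ⟨C, hC, _⟩
          exact absurd hC (List.not_mem_nil)
      · intro a ha
        exact absurd ha (List.not_mem_nil)
    obtain ⟨⟨i1, i2, i3⟩, j2, _⟩ := outerA_spec (pointsRowMajor art) (pointsRowMajor art)
      (fun x hx => hx) ([], PySem.Set.empty) hinv0
    obtain ⟨t0, rest0, ht0⟩ := List.exists_cons_of_ne_nil hpts
    have ht0mem : t0 ∈ pointsRowMajor art := by rw [ht0]; exact List.mem_cons_self
    have ht0v := j2 t0 ht0mem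
    obtain ⟨C0, hC0, _⟩ := (i2 t0).mp ht0v
    rcases hsorted : PySem.List.sorted ((pointsRowMajor art).foldl (fun cv point =>
        if point ∈ cv.2 then cv
        else
          let visited' := PySem.Set.add cv.2 point
          let res := floodLoop (pointsRowMajor art) visited' [point] PySem.Set.empty
          (cv.1 ++ [res.1], res.2)) ([], PySem.Set.empty)).1
        (fun c => PySem.List.len c) true with _ | ⟨m, tl⟩
    · have hnil := (PySem.List.sorted_eq_nil_iff _ _ _).mp hsorted
      rw [hnil] at hC0
      exact absurd hC0 (List.not_mem_nil)
    · rw [PySem.List.pyGetD_zero_cons]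
      have hm_mem : m ∈ ((pointsRowMajor art).foldl (fun cv point =>
          if point ∈ cv.2 then cv
          else
            let visited' := PySem.Set.add cv.2 point
            let res := floodLoop (pointsRowMajor art) visited' [point] PySem.Set.empty
            (cv.1 ++ [res.1], res.2)) ([], PySem.Set.empty)).1 := by
        rw [← PySem.List.mem_sorted _ (fun c => PySem.List.len c) true m, hsorted]
        exact List.mem_cons_self
      have hmax := PySem.List.key_head_sorted_rev_ge _ (fun c => PySem.List.len c) hsorted
      obtain ⟨s, hs_pts, hmem_iff, hm_nd⟩ := i1 m hm_mem
      refine ⟨fun h => absurd h hpts, fun _ => ⟨s, hs_pts, hmem_iff, ?_⟩⟩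
      intro t ht
      obtain ⟨C, hC, htC⟩ := (i2 t).mp (j2 t ht)
      obtain ⟨sC, hsC_pts, hC_iff, hC_nd⟩ := i1 C hC
      have h1 : (pvClosure (pointsRowMajor art) t).length =
          (pvClosure (pointsRowMajor art) sC).length :=
        pvClen_congr (pointsRowMajor art) sC t hsC_pts ht hnd ((hC_iff t).mp htC)
      have h2 : C.length = (pvClosure (pointsRowMajor art) sC).length :=
        pvClen_eq (pointsRowMajor art) sC C hsC_pts hnd hC_nd hC_iff
      have h3 : m.length = (pvClosure (pointsRowMajor art) s).length :=
        pvClen_eq (pointsRowMajor art) s m hs_pts hnd hm_nd hmem_iff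
      have h4 := hmax C hC
      simp only [PySem.List.len_eq] at h4
      have h5 : C.length ≤ m.length := by exact_mod_cast h4
      omega

-- the mask B's outer fold keeps (named for the proofs below; rfl-equal to the port's fold)
def pvAltBest (art : List String) : PySem.Set (Int × Int) :=
  ((pointsRowMajor art).foldl (fun st seed =>
      if seed ∈ st.1 then st
      else
        let comp := bfsLoop (PySem.Set.ofList (pointsRowMajor art))
          (PySem.Set.ofList [seed]) (PySem.Set.ofList [seed])
        let done' := PySem.Set.union st.1 comp
        if PySem.List.len comp > st.2.2 then (done', comp, PySem.List.len comp)
        else (done', st.2.1, st.2.2))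
    (PySem.Set.empty, PySem.Set.empty, 0)).2.1

theorem maskB_good (art : List String) : pvGoodMask (pointsRowMajor art) (pvAltBest art) := by
  have hnd := nodup_pointsRowMajor art
  unfold pvAltBest
  simp only [PySem.Set.ofList_eq_self_of_nodup (pointsRowMajor art) hnd]
  have hinv0 : pvInvB (pointsRowMajor art) (PySem.Set.empty, PySem.Set.empty, 0) := by
    refine ⟨?_, ?_, Or.inl ⟨rfl, rfl, rfl⟩⟩
    · intro x hx
      exact absurd hx (List.not_mem_nil)
    · intro a ha
      exact absurd ha (List.not_mem_nil)
  obtain ⟨⟨k1, k2, k3⟩, j2, _⟩ := outerB_spec (pointsRowMajor art) hnd (pointsRowMajor art)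
    (fun x hx => hx) (PySem.Set.empty, PySem.Set.empty, 0) hinv0
  by_cases hpts : pointsRowMajor art = []
  · constructor
    · intro _
      rcases k3 with ⟨_, hb, _⟩ | ⟨s0, hs0pts, _⟩
      · exact hb
      · rw [hpts] at hs0pts
        exact absurd hs0pts (List.not_mem_nil)
    · intro hne
      exact absurd hpts hne
  · refine ⟨fun h => absurd h hpts, fun _ => ?_⟩
    obtain ⟨t0, rest0, ht0⟩ := List.exists_cons_of_ne_nil hpts
    have ht0mem : t0 ∈ pointsRowMajor art := by rw [ht0]; exact List.mem_cons_self
    have ht0d := j2 t0 ht0mem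
    rcases k3 with ⟨hd0, _, _⟩ | ⟨s0, hs0pts, hm0, hnd0, _, hmax0⟩
    · rw [hd0] at ht0d
      exact absurd ht0d (List.not_mem_nil)
    · exact ⟨s0, hs0pts, hm0, fun t ht => hmax0 t (j2 t ht)⟩

-- ---- rendering: both output stages produce the same strings from equal masks ----
def pvPiece (mask : List (Int × Int)) (pc sc : String) (r : Int) (cc : Int × Char) : String :=
  if cc.2 = ' ' then String.ofList [cc.2]
  else (if (r, cc.1) ∈ mask then pc else sc) ++ String.ofList [cc.2] ++ ANSI_RESET

theorem colorize_text_single (c : Char) (col : String) :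
    colorize_text (String.ofList [c]) (some col) = col ++ String.ofList [c] ++ ANSI_RESET := by
  unfold colorize_text
  rw [if_neg]
  · rfl
  · rintro (h | h | h)
    · simp [COLOR_OUTPUT_ENABLED] at h
    · cases h
    · have h2 := congrArg String.toList h
      simp at h2

theorem B_unfold (art : List String) (pc sc : String) :
    colorize_art_lines_alt art pc sc = (PySem.List.enumerate art).map (fun rl =>
      PySem.Str.join "" ((PySem.List.enumerate rl.2.toList).map (pvPiece (pvAltBest art) pc sc rl.1))) := rfl

theorem A_unfold (art : List String) (pc sc : String) :
    colorize_art_lines art pc sc = (PySem.List.enumerate art).map (fun rl =>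
      PySem.Str.join "" ((PySem.List.enumerate rl.2.toList).map
        (pvPiece (build_primary_art_component_mask art) pc sc rl.1))) := by
  unfold colorize_art_lines
  rw [if_neg (by simp [COLOR_OUTPUT_ENABLED])]
  show (PySem.List.enumerate art).foldl (fun colored_lines rl =>
      colored_lines ++ [PySem.Str.join "" ((PySem.List.enumerate rl.2.toList).foldl (fun parts cc =>
        if cc.2 = ' ' then parts ++ [String.ofList [cc.2]]
        else parts ++ [colorize_text (String.ofList [cc.2])
          (some (if (rl.1, cc.1) ∈ build_primary_art_component_mask art then pc else sc))]) [])]) [] = _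
  have hstep : ∀ (r : Int), (fun (parts : List String) (cc : Int × Char) =>
      if cc.2 = ' ' then parts ++ [String.ofList [cc.2]]
      else parts ++ [colorize_text (String.ofList [cc.2])
        (some (if (r, cc.1) ∈ build_primary_art_component_mask art then pc else sc))]) =
      (fun parts cc => parts ++ [pvPiece (build_primary_art_component_mask art) pc sc r cc]) := by
    intro r
    funext parts cc
    unfold pvPiece
    by_cases h : cc.2 = ' '
    · rw [if_pos h, if_pos h]
    · rw [if_neg h, if_neg h, colorize_text_single]
  simp only [hstep]
  simp only [PySem.List.foldl_append_singleton_eq_map, List.nil_append]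

theorem render_congr (M1 M2 : List (Int × Int)) (h : ∀ x, x ∈ M1 ↔ x ∈ M2)
    (pc sc : String) (art : List String) :
    (PySem.List.enumerate art).map (fun rl =>
      PySem.Str.join "" ((PySem.List.enumerate rl.2.toList).map (pvPiece M1 pc sc rl.1))) =
    (PySem.List.enumerate art).map (fun rl =>
      PySem.Str.join "" ((PySem.List.enumerate rl.2.toList).map (pvPiece M2 pc sc rl.1))) := by
  apply List.map_congr_left
  intro rl _
  congr 1
  apply List.map_congr_left
  intro cc _
  unfold pvPiece
  by_cases hsp : cc.2 = ' '
  · rw [if_pos hsp, if_pos hsp]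
  · rw [if_neg hsp, if_neg hsp]
    congr 1
    congr 1
    exact if_congr (h (rl.1, cc.1)) rfl rfl

-- ===== VERDICT (by name: the statement is the Claim_ definition above) =====
theorem colorize_art_lines_spec : Claim_equal_colorize_art_lines := by
  intro art pc sc _hdom hpre
  unfold Spec_colorize_art_lines
  rw [A_unfold, B_unfold]
  apply render_congr
  exact pvGoodMask_unique (pointsRowMajor art) (build_primary_art_component_mask art)
    (pvAltBest art) (nodup_pointsRowMajor art) hpre (maskA_good art) (maskB_good art)
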